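-- pv_equiv track=rewrite | github.com/rjcasi/cyber-arena | math_engine/number_theory.py | analyze_number
-- ===== SOURCE A (Python) =====
-- def is_prime(n):
--     if n < 2:
--         return False
--     for i in range(2, int(n**0.5)+1):
--         if n % i == 0:
--             return False
--     return True
--
-- def analyze_number(n: int):
--     return (
--         f"[Number Theory]\n"
--         f"Input: {n}\n"
--         f"Prime: {is_prime(n)}\n"
--         f"Divisors: {[i for i in range(1, n+1) if n % i == 0]}\n"
--         f"Euler phi (simulated): {n-1 if is_prime(n) else 'complex'}\n"
--     )
-- ===== SOURCE B (Python) =====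
-- def analyze_number(n: int):
--     # Divisors via complementary pairs up to sqrt(n): O(sqrt n) instead of O(n).
--     small = []
--     large = []
--     i = 1
--     while i * i <= n:
--         if n % i == 0:
--             small.append(i)
--             if i != n // i:
--                 large.append(n // i)
--         i += 1
--     divisors = small + large[::-1]
--     prime = n >= 2 and len(divisors) == 2
--     return (
--         f"[Number Theory]\n"
--         f"Input: {n}\n"
--         f"Prime: {prime}\n"
--         f"Divisors: {divisors}\n"
--         f"Euler phi (simulated): {n - 1 if prime else 'complex'}\n"
--     )
-- ===== Notes on version B (the rewrite author's own statement) =====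
-- stated objective: faster
-- what changed: Divisors are collected as complementary pairs (i, n//i) for i up to sqrt(n) and merged in order, and primality is derived from the divisor count (n>=2 and exactly two divisors) instead of a separate trial-division loop over range(1,n+1).
import Mathlib
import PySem

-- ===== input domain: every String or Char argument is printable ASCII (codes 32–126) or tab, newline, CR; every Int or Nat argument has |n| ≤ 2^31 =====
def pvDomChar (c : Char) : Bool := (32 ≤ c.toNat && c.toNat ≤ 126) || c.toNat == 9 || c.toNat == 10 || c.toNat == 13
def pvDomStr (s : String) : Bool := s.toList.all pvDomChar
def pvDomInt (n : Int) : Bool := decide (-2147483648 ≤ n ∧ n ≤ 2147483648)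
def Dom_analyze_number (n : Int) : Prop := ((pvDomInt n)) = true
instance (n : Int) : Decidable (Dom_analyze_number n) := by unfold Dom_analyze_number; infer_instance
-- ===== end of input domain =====

-- B replaces A's O(n) divisor scan by the sqrt divisor-pair collection and derives primality
-- from the divisor count; proved to return the same string for every n.

-- shared f-string formatting helpers (both Pythons format via the same f-string semantics)
def pyBoolRepr (b : Bool) : String := if b then "True" else "False"
def pyIntListRepr (xs : List Int) : String :=
  "[" ++ String.intercalate ", " (xs.map PySem.Int.toStr) ++ "]"

-- ===== PORT A =====
-- int(n**0.5) is ported as Nat.sqrt n.toNat: exact for 0 ≤ n ≤ 2^31 (the double sqrt of such n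
-- is correctly rounded and truncation yields the integer square root); only reached when n ≥ 2.
def is_prime (n : Int) : Bool :=
  if n < 2 then false
  else (PySem.List.pyRange 2 ((Nat.sqrt n.toNat : Int) + 1) 1).all
        (fun i => !(PySem.Int.mod n i == 0))

def analyze_number (n : Int) : String :=
  "[Number Theory]\n" ++
  "Input: " ++ PySem.Int.toStr n ++ "\n" ++
  "Prime: " ++ pyBoolRepr (is_prime n) ++ "\n" ++
  "Divisors: " ++ pyIntListRepr
      ((PySem.List.pyRange 1 (n + 1) 1).filter (fun i => PySem.Int.mod n i == 0)) ++ "\n" ++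
  "Euler phi (simulated): " ++
      (if is_prime n then PySem.Int.toStr (n - 1) else "complex") ++ "\n"

-- ===== PORT B =====
-- the while-loop of Source B: i walks 1,2,… while i*i ≤ n, pushing i on `small` and n//i on
-- `large`; the Nat fuel only makes the recursion structural and never runs out (the loop
-- performs at most n steps, and the caller passes n.toNat + 1)
def pvCollect (n : Int) : Nat → Int → List Int → List Int → List Int × List Int
  | 0, _, small, large => (small, large)
  | fuel + 1, i, small, large =>
    if i * i ≤ n then
      if PySem.Int.mod n i == 0 then
        pvCollect n fuel (i + 1) (small ++ [i])
          (if i ≠ PySem.Int.floordiv n i then large ++ [PySem.Int.floordiv n i] else large)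
      else pvCollect n fuel (i + 1) small large
    else (small, large)

def analyze_number_alt (n : Int) : String :=
  let p := pvCollect n (n.toNat + 1) 1 [] []
  -- large[::-1] is List.reverse (exact: PySem.List.slice?_none_none_neg_one)
  let divisors := p.1 ++ p.2.reverse
  let prime := decide (2 ≤ n) && (divisors.length == 2)
  "[Number Theory]\n" ++
  "Input: " ++ PySem.Int.toStr n ++ "\n" ++
  "Prime: " ++ pyBoolRepr prime ++ "\n" ++
  "Divisors: " ++ pyIntListRepr divisors ++ "\n" ++
  "Euler phi (simulated): " ++
      (if prime then PySem.Int.toStr (n - 1) else "complex") ++ "\n"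

-- ===== PRECONDITION & SPEC =====
def Spec_analyze_number (n : Int) (out : String) : Prop := out = analyze_number_alt n
instance (n : Int) (out : String) : Decidable (Spec_analyze_number n out) := by unfold Spec_analyze_number; infer_instance

-- ===== CLAIM (what is proved, stated in full; the proofs are below) =====
def Claim_equal_analyze_number : Prop := ∀ (n : Int), Dom_analyze_number n → Spec_analyze_number n (analyze_number n)

-- ===== LEMMAS AND PROOFS =====

-- the three filtered lists the proofs talk about
def pvFle (n : Int) : List Int :=
  (PySem.List.pyRange 1 (n + 1) 1).filter (fun j => decide (j * j ≤ n) && (PySem.Int.mod n j == 0))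
def pvFlt (n : Int) : List Int :=
  (PySem.List.pyRange 1 (n + 1) 1).filter (fun j => decide (j * j < n) && (PySem.Int.mod n j == 0))
def pvFall (n : Int) : List Int :=
  (PySem.List.pyRange 1 (n + 1) 1).filter (fun j => PySem.Int.mod n j == 0)

lemma pvFilter_nil_of_big (n i : Int) (p : Int → Bool) (h1 : 1 ≤ i) (h2 : n < i * i)
    (hp : ∀ j, p j = true → j * j ≤ n) :
    (PySem.List.pyRange i (n + 1) 1).filter p = [] := by
  rw [List.filter_eq_nil_iff]
  intro j hj hpj
  have hm := (PySem.List.mem_pyRange_one).mp hj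
  have : i * i ≤ j * j := by nlinarith
  have := hp j hpj
  omega

lemma pvFilters_nil (n i : Int) (hi : 1 ≤ i) (h : ¬ i * i ≤ n) :
    (PySem.List.pyRange i (n + 1) 1).filter
        (fun j => decide (j * j ≤ n) && (PySem.Int.mod n j == 0)) = [] ∧
    (PySem.List.pyRange i (n + 1) 1).filter
        (fun j => decide (j * j < n) && (PySem.Int.mod n j == 0)) = [] :=
  ⟨pvFilter_nil_of_big n i _ hi (by omega)
      (by intro j hj; simp only [Bool.and_eq_true, decide_eq_true_eq] at hj; exact hj.1),
   pvFilter_nil_of_big n i _ hi (by omega)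
      (by intro j hj; simp only [Bool.and_eq_true, decide_eq_true_eq] at hj; omega)⟩

lemma pvCollect_closed (n : Int) : ∀ (fuel : Nat) (i : Int) (s l : List Int), 1 ≤ i →
    (n + 1 - i).toNat ≤ fuel →
    pvCollect n fuel i s l =
      (s ++ (PySem.List.pyRange i (n + 1) 1).filter
              (fun j => decide (j * j ≤ n) && (PySem.Int.mod n j == 0)),
       l ++ ((PySem.List.pyRange i (n + 1) 1).filter
              (fun j => decide (j * j < n) && (PySem.Int.mod n j == 0))).map (fun j => n / j)) := by
  intro fuel
  induction fuel with
  | zero =>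
    intro i s l hi hk
    have h : ¬ i * i ≤ n := by
      intro h
      have : i ≤ i * i := by nlinarith
      omega
    obtain ⟨h1, h2⟩ := pvFilters_nil n i hi h
    rw [pvCollect, h1, h2]
    simp
  | succ fuel ih =>
    intro i s l hi hk
    by_cases h : i * i ≤ n
    · have h2 : 2 * i ≤ n + 1 := by nlinarith [mul_self_nonneg (i - 1)]
      have hin : i < n + 1 := by omega
      have hi0 : (0:Int) < i := by omega
      rw [pvCollect, if_pos h, PySem.List.pyRange_one_cons hin]
      simp only [List.filter_cons]
      by_cases hd : i ∣ n
      · have hb : (PySem.Int.mod n i == 0) = true := by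
          simp [PySem.Int.mod_eq_zero_iff_dvd, hd]
        have hfd : PySem.Int.floordiv n i = n / i :=
          PySem.Int.floordiv_eq_ediv_of_pos hi0
        have hndi : n / i * i = n := Int.ediv_mul_cancel hd
        rw [if_pos hb, hfd]
        by_cases hsq : i * i < n
        · have hne : i ≠ n / i := by
            intro he
            rw [← he] at hndi
            omega
          rw [if_pos hne,
            ih (i + 1) (s ++ [i]) (l ++ [n / i]) (by omega) (by omega)]
          simp [hb, h, hsq]
        · have hsq' : i * i = n := by omega
          have he : i = n / i := by
            have : i * i / i = n / i := by rw [hsq']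
            rwa [Int.mul_ediv_cancel_left i (by omega)] at this
          rw [if_neg (by simpa using he),
            ih (i + 1) (s ++ [i]) l (by omega) (by omega)]
          simp [hb, h, hsq]
      · have hb : (PySem.Int.mod n i == 0) = false := by
          simp [PySem.Int.mod_eq_zero_iff_dvd, hd]
        rw [if_neg (by simp [hb]),
          ih (i + 1) s l (by omega) (by omega)]
        simp [hb]
    · obtain ⟨h1, h2⟩ := pvFilters_nil n i hi h
      rw [pvCollect, if_neg h, h1, h2]
      simp

lemma mem_pvFall (n x : Int) : x ∈ pvFall n ↔ 1 ≤ x ∧ x ≤ n ∧ x ∣ n := by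
  simp only [pvFall, List.mem_filter, PySem.List.mem_pyRange_one, beq_iff_eq,
    PySem.Int.mod_eq_zero_iff_dvd]
  constructor
  · rintro ⟨⟨h1, h2⟩, h3⟩; exact ⟨h1, by omega, h3⟩
  · rintro ⟨h1, h2, h3⟩; exact ⟨⟨h1, by omega⟩, h3⟩

lemma mem_pvFle (n x : Int) : x ∈ pvFle n ↔ 1 ≤ x ∧ x * x ≤ n ∧ x ∣ n := by
  simp only [pvFle, List.mem_filter, PySem.List.mem_pyRange_one, Bool.and_eq_true,
    decide_eq_true_eq, beq_iff_eq, PySem.Int.mod_eq_zero_iff_dvd]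
  constructor
  · rintro ⟨⟨h1, h2⟩, h3, h4⟩; exact ⟨h1, h3, h4⟩
  · rintro ⟨h1, h2, h3⟩
    exact ⟨⟨h1, by nlinarith⟩, h2, h3⟩

lemma mem_pvFlt (n x : Int) : x ∈ pvFlt n ↔ 1 ≤ x ∧ x * x < n ∧ x ∣ n := by
  simp only [pvFlt, List.mem_filter, PySem.List.mem_pyRange_one, Bool.and_eq_true,
    decide_eq_true_eq, beq_iff_eq, PySem.Int.mod_eq_zero_iff_dvd]
  constructor
  · rintro ⟨⟨h1, h2⟩, h3, h4⟩; exact ⟨h1, h3, h4⟩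
  · rintro ⟨h1, h2, h3⟩
    exact ⟨⟨h1, by nlinarith⟩, h2, h3⟩

lemma mem_pvMap (n y : Int) (hn : 1 ≤ n) :
    y ∈ (pvFlt n).map (fun j => n / j) ↔ 1 ≤ y ∧ n < y * y ∧ y ≤ n ∧ y ∣ n := by
  simp only [List.mem_map, mem_pvFlt]
  constructor
  · rintro ⟨j, ⟨hj1, hj2, hjd⟩, rfl⟩
    have hq : n / j * j = n := Int.ediv_mul_cancel hjd
    have hjq : j < n / j := by nlinarith
    exact ⟨by omega, by nlinarith, by nlinarith, ⟨j, hq.symm⟩⟩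
  · rintro ⟨hy1, hy2, hy3, hyd⟩
    set q := n / y with hq'
    have hq : q * y = n := Int.ediv_mul_cancel hyd
    have hj1 : 1 ≤ q := by nlinarith
    have hjy : q < y := by nlinarith
    refine ⟨q, ⟨hj1, by nlinarith, ⟨y, hq.symm⟩⟩, ?_⟩
    rw [← hq, Int.mul_ediv_cancel_left y (by omega)]

lemma pairwise_pvFall (n : Int) : (pvFall n).Pairwise (· < ·) := by
  exact List.Pairwise.filter _ (PySem.List.pairwise_lt_pyRange_one 1 (n + 1))

lemma pairwise_merge (n : Int) (hn : 1 ≤ n) :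
    ((pvFle n) ++ ((pvFlt n).map (fun j => n / j)).reverse).Pairwise (· < ·) := by
  rw [List.pairwise_append]
  refine ⟨List.Pairwise.filter _ (PySem.List.pairwise_lt_pyRange_one 1 (n + 1)), ?_, ?_⟩
  · rw [List.pairwise_reverse, List.pairwise_map]
    refine List.Pairwise.imp_of_mem ?_
      (List.Pairwise.filter _ (PySem.List.pairwise_lt_pyRange_one 1 (n + 1)) :
        (pvFlt n).Pairwise (· < ·))
    intro a b ha hb hab
    rw [mem_pvFlt] at ha hb
    obtain ⟨ha1, ha2, had⟩ := ha
    obtain ⟨hb1, hb2, hbd⟩ := hb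
    have hqa : n / a * a = n := Int.ediv_mul_cancel had
    have hqb : n / b * b = n := Int.ediv_mul_cancel hbd
    have hb0 : 1 ≤ n / b := by nlinarith
    show n / b < n / a
    nlinarith
  · intro x hx y hy
    rw [mem_pvFle] at hx
    rw [List.mem_reverse, mem_pvMap n y (by rcases hx with ⟨h1, h2, -⟩; nlinarith)] at hy
    obtain ⟨hx1, hx2, -⟩ := hx
    obtain ⟨hy1, hy2, -, -⟩ := hy
    nlinarith

lemma merge_eq (n : Int) :
    (pvFle n) ++ ((pvFlt n).map (fun j => n / j)).reverse = pvFall n := by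
  by_cases hn : 1 ≤ n
  · have pw1 := pairwise_merge n hn
    have pw2 := pairwise_pvFall n
    refine List.Perm.eq_of_pairwise (fun a b _ _ h1 h2 => le_antisymm h1 h2)
      (pw1.imp (fun h => le_of_lt h)) (pw2.imp (fun h => le_of_lt h)) ?_
    rw [List.perm_ext_iff_of_nodup (pw1.imp (fun h => ne_of_lt h)) (pw2.imp (fun h => ne_of_lt h))]
    intro x
    rw [List.mem_append, List.mem_reverse, mem_pvFle, mem_pvMap n x hn, mem_pvFall]
    constructor
    · rintro (⟨h1, h2, h3⟩ | ⟨h1, h2, h3, h4⟩)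
      · exact ⟨h1, by nlinarith, h3⟩
      · exact ⟨h1, h3, h4⟩
    · rintro ⟨h1, h2, h3⟩
      by_cases hs : x * x ≤ n
      · exact Or.inl ⟨h1, hs, h3⟩
      · exact Or.inr ⟨h1, by omega, h2, h3⟩
  · unfold pvFle pvFlt pvFall
    rw [PySem.List.pyRange_one_eq_nil (by omega)]
    simp

lemma pvNoMid (n : Int) (hn : 2 ≤ n) :
    (∀ d, 2 ≤ d → d * d ≤ n → ¬ d ∣ n) ↔ ¬ ∃ d, 1 < d ∧ d < n ∧ d ∣ n := by
  constructor
  · intro P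
    rintro ⟨d, hd1, hd2, hdd⟩
    by_cases hs : d * d ≤ n
    · exact P d (by omega) hs hdd
    · have hq : n / d * d = n := Int.ediv_mul_cancel hdd
      set e := n / d with he'
      have he1 : 1 ≤ e := by nlinarith
      have hed : e < d := by nlinarith
      have he2 : 2 ≤ e := by
        rcases lt_or_ge e 2 with h | h
        · have : e = 1 := by omega
          rw [this] at hq; omega
        · exact h
      exact P e he2 (by nlinarith) ⟨d, hq.symm⟩
  · intro h d hd2 hdd hdvd
    exact h ⟨d, by omega, by nlinarith, hdvd⟩

lemma pvLen2 (n : Int) (hn : 2 ≤ n) :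
    (pvFall n).length = 2 ↔ ¬ ∃ d, 1 < d ∧ d < n ∧ d ∣ n := by
  constructor
  · intro hlen
    rintro ⟨d, hd1, hd2, hdd⟩
    have sub : [1, d, n] ⊆ pvFall n := by
      intro x hx
      simp only [List.mem_cons, List.not_mem_nil, or_false] at hx
      rw [mem_pvFall]
      rcases hx with h | h | h
      · subst h; exact ⟨le_rfl, by omega, one_dvd _⟩
      · subst h; exact ⟨by omega, by omega, hdd⟩
      · subst h; exact ⟨by omega, le_rfl, dvd_rfl⟩
    have nd : ([1, d, n] : List Int).Nodup := by
      simp only [List.nodup_cons, List.mem_cons, List.not_mem_nil, List.nodup_nil,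
        or_false, and_true, not_or]
      exact ⟨⟨by omega, by omega⟩, by omega, not_false⟩
    have := (List.subperm_of_subset nd sub).length_le
    simp only [List.length_cons, List.length_nil] at this
    omega
  · intro hno
    have hfall : pvFall n = [1, n] := by
      refine List.Perm.eq_of_pairwise (fun a b _ _ h1 h2 => le_antisymm h1 h2)
        ((pairwise_pvFall n).imp (fun h => le_of_lt h)) (by simp; omega) ?_
      rw [List.perm_ext_iff_of_nodup ((pairwise_pvFall n).imp (fun h => ne_of_lt h))
        (by simp; omega)]
      intro x
      rw [mem_pvFall]
      simp only [List.mem_cons, List.not_mem_nil, or_false]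
      constructor
      · rintro ⟨h1, h2, h3⟩
        by_contra hc
        rw [not_or] at hc
        exact hno ⟨x, by omega, by omega, h3⟩
      · rintro (rfl | rfl)
        · exact ⟨le_rfl, by omega, one_dvd n⟩
        · exact ⟨by omega, le_rfl, dvd_rfl⟩
    rw [hfall]
    rfl

lemma primeEq (n : Int) : is_prime n = (decide (2 ≤ n) && ((pvFall n).length == 2)) := by
  by_cases hn : 2 ≤ n
  · rw [is_prime, if_neg (by omega), Bool.eq_iff_iff, List.all_eq_true]
    have hsq : ∀ i : Int, 2 ≤ i → (i < (Nat.sqrt n.toNat : Int) + 1 ↔ i * i ≤ n) := by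
      intro i hi
      obtain ⟨a, ha⟩ := Int.eq_ofNat_of_zero_le (show (0:Int) ≤ i by omega)
      obtain ⟨m, hm⟩ := Int.eq_ofNat_of_zero_le (show (0:Int) ≤ n by omega)
      subst ha hm
      rw [Int.lt_add_one_iff]
      simp only [Int.toNat_natCast]
      exact_mod_cast Nat.le_sqrt
    constructor
    · intro hall
      have P : ∀ d, 2 ≤ d → d * d ≤ n → ¬ d ∣ n := by
        intro d h2 hdd hdvd
        have := hall d (by rw [PySem.List.mem_pyRange_one]; exact ⟨h2, (hsq d h2).mpr hdd⟩)
        simp [PySem.Int.mod_eq_zero_iff_dvd, hdvd] at this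
      have hlen := (pvLen2 n hn).mpr ((pvNoMid n hn).mp P)
      simp [hn, hlen]
    · intro hr
      have hlen : (pvFall n).length = 2 := by
        simp only [Bool.and_eq_true, beq_iff_eq] at hr
        exact hr.2
      have P := (pvNoMid n hn).mpr ((pvLen2 n hn).mp hlen)
      intro i hi
      rw [PySem.List.mem_pyRange_one] at hi
      have hii : i * i ≤ n := (hsq i hi.1).mp hi.2
      have := P i hi.1 hii
      simp [PySem.Int.mod_eq_zero_iff_dvd, this]
  · rw [is_prime, if_pos (by omega)]
    simp [hn]

-- ===== VERDICT (by name: the statement is the Claim_ definition above) =====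
theorem analyze_number_spec : Claim_equal_analyze_number := by
  intro n _
  unfold Spec_analyze_number analyze_number analyze_number_alt
  have hc := pvCollect_closed n (n.toNat + 1) 1 [] [] le_rfl (by omega)
  simp only [List.nil_append] at hc
  rw [hc]
  dsimp only
  have hm := merge_eq n
  have hp := primeEq n
  unfold pvFle pvFlt pvFall at hm
  unfold pvFall at hp
  rw [hm, ← hp]
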